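-- pv_equiv track=rewrite | github.com/dulpneto/exponential_rs_rl | environment/RiverCrossingEnv.py | init_step_safe_policy
-- ===== SOURCE A (Python) =====
-- def init_step_safe_policy(shape):
--     step_safe_policy = {}
--     h, w = shape
--     for y in range(h):
--         for x in range(w):
--             s = x + (y * w)
--             # 0 North, 1 South,  2 East, 3 West
--             if x == w - 1 and y == h - 1:  # meta
--                 step_safe_policy[s] = 1
--             elif x == w - 1:  # margem direita
--                 step_safe_policy[s] = 1
--             elif y == 0:  # ponte
--                 step_safe_policy[s] = 2
--             elif x == 0:  # margem esquerda
--                 step_safe_policy[s] = 0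
--             elif y == h - 1:  # cachoeira
--                 step_safe_policy[s] = 2
--             else:  # rio
--                 step_safe_policy[s] = 2
--     return step_safe_policy
-- ===== SOURCE B (Python) =====
-- def init_step_safe_policy(shape):
--     h, w = shape
--     if h <= 0 or w <= 0:
--         return {}
--     # default everywhere: 2 (east)
--     policy = dict.fromkeys(range(h * w), 2)
--     # override: left bank (column 0, below the bridge row) goes north
--     for y in range(1, h):
--         policy[y * w] = 0
--     # override last: right bank (column w-1) goes south; wins when w == 1
--     for y in range(h):
--         policy[y * w + w - 1] = 1
--     return policy
-- ===== Notes on version B (the rewrite author's own statement) =====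
-- stated objective: simpler
-- what changed: Replaces the per-cell five-way conditional cascade inside nested y/x loops by a default-plus-override scheme: one full-grid fill with the default 2, then an O(h) pass setting the left column (rows >= 1) to 0, then an O(h) pass setting the right column to 1 last so it wins when w == 1.
import Mathlib
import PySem

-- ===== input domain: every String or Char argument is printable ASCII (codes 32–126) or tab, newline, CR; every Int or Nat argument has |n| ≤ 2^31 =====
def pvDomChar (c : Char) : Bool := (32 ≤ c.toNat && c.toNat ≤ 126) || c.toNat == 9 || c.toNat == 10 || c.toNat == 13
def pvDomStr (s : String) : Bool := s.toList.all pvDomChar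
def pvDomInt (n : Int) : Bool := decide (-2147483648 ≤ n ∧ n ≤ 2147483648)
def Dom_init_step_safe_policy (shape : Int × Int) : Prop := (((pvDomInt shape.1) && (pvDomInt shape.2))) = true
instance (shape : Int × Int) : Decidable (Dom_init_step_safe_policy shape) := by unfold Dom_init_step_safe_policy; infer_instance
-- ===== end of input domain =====

-- B replaces A's per-cell conditional cascade inside nested loops by a default-plus-override
-- scheme: a full-grid fill with 2, then a left-column pass (rows >= 1) setting 0, then a
-- right-column pass setting 1 last (objective: simpler).

-- ===== PORT A =====
def init_step_safe_policy (shape : Int × Int) : List (Int × Int) :=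
  let h := shape.1
  let w := shape.2
  ((PySem.List.pyRange 0 h 1).foldl (fun d y =>
      (PySem.List.pyRange 0 w 1).foldl (fun d x =>
        let s := x + y * w
        if x == w - 1 && y == h - 1 then d.insert s 1
        else if x == w - 1 then d.insert s 1
        else if y == 0 then d.insert s 2
        else if x == 0 then d.insert s 0
        else if y == h - 1 then d.insert s 2
        else d.insert s 2) d)
    (PySem.Dict.empty : PySem.Dict Int Int)).items

-- ===== PORT B =====
def init_step_safe_policy_alt (shape : Int × Int) : List (Int × Int) :=
  let h := shape.1
  let w := shape.2
  if h ≤ 0 ∨ w ≤ 0 then []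
  else
    -- dict.fromkeys(range(h*w), 2): insert each key in order with the default 2 (exact)
    let d0 := (PySem.List.pyRange 0 (h * w) 1).foldl (fun d s => d.insert s 2)
      (PySem.Dict.empty : PySem.Dict Int Int)
    let d1 := (PySem.List.pyRange 1 h 1).foldl (fun d y => d.insert (y * w) 0) d0
    let d2 := (PySem.List.pyRange 0 h 1).foldl (fun d y => d.insert (y * w + w - 1) 1) d1
    d2.items

-- ===== PRECONDITION & SPEC =====
def Spec_init_step_safe_policy (shape : Int × Int) (out : List (Int × Int)) : Prop := out = init_step_safe_policy_alt shape
instance (shape : Int × Int) (out : List (Int × Int)) : Decidable (Spec_init_step_safe_policy shape out) := by unfold Spec_init_step_safe_policy; infer_instance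

-- ===== CLAIM (what is proved, stated in full; the proofs are below) =====
def Claim_equal_init_step_safe_policy : Prop := ∀ (shape : Int × Int), Dom_init_step_safe_policy shape → Spec_init_step_safe_policy shape (init_step_safe_policy shape)

-- ===== LEMMAS AND PROOFS =====

-- the value A's branch cascade assigns to cell (y, x)
def pvAVal (h w y x : Int) : Int :=
  if x == w - 1 && y == h - 1 then 1
  else if x == w - 1 then 1
  else if y == 0 then 2
  else if x == 0 then 0
  else if y == h - 1 then 2
  else 2

-- A's inner-loop body is an insert of pvAVal
lemma pvA_body (h w y x : Int) (d : PySem.Dict Int Int) :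
    (let s := x + y * w
     if x == w - 1 && y == h - 1 then d.insert s 1
     else if x == w - 1 then d.insert s 1
     else if y == 0 then d.insert s 2
     else if x == 0 then d.insert s 0
     else if y == h - 1 then d.insert s 2
     else d.insert s 2) = d.insert (x + y * w) (pvAVal h w y x) := by
  simp only [pvAVal]
  split_ifs <;> rfl

-- one row of A's loop over fresh keys appends its cells
lemma pvA_row (w y : Int) (f : Int → Int) (d : PySem.Dict Int Int)
    (hd : ∀ x ∈ PySem.List.pyRange 0 w 1, d.contains (x + y * w) = false) :
    ((PySem.List.pyRange 0 w 1).foldl (fun d x => d.insert (x + y * w) (f x)) d).items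
      = d.items ++ (PySem.List.pyRange 0 w 1).map (fun x => (x + y * w, f x)) := by
  exact PySem.Dict.items_foldl_insert_fresh _ (fun x => x + y * w) f d hd
    (((PySem.List.nodup_pyRange_one 0 w)).map (fun a b hab => by omega))

-- floordiv/mod decode a row-major cell index
lemma pv_decode (w y x : Int) (hw : 0 < w) (hx0 : 0 ≤ x) (hxw : x < w) :
    PySem.Int.floordiv (x + y * w) w = y ∧ PySem.Int.mod (x + y * w) w = x := by
  have hq : PySem.Int.floordiv (x + y * w) w = y := by
    rw [PySem.Int.floordiv_eq_iff_of_pos hw]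
    constructor <;> nlinarith
  refine ⟨hq, ?_⟩
  have := PySem.Int.floordiv_mul_add_mod (x + y * w) w
  rw [hq] at this; linarith

-- A's whole loop produces the row-major list of (s, value at decoded cell)
lemma pvA_loop (w : Int) (hw : 0 < w) (f : Int → Int → Int) (n : Nat) :
    ((PySem.List.pyRange 0 (n : Int) 1).foldl
        (fun d y => (PySem.List.pyRange 0 w 1).foldl (fun d x => d.insert (x + y * w) (f y x)) d)
        (PySem.Dict.empty : PySem.Dict Int Int)).items
      = (PySem.List.pyRange 0 ((n : Int) * w) 1).map
          (fun s => (s, f (PySem.Int.floordiv s w) (PySem.Int.mod s w))) := by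
  induction n with
  | zero =>
    simp [PySem.List.pyRange_one]
    rfl
  | succ n ih =>
    have hcast : ((n + 1 : Nat) : Int) = (n : Int) + 1 := by push_cast; ring
    rw [hcast, PySem.List.pyRange_one_succ_right (by positivity), List.foldl_append]
    simp only [List.foldl_cons, List.foldl_nil]
    have hfresh : ∀ x ∈ PySem.List.pyRange 0 w 1,
        ((PySem.List.pyRange 0 (n : Int) 1).foldl
          (fun d y => (PySem.List.pyRange 0 w 1).foldl (fun d x => d.insert (x + y * w) (f y x)) d)
          (PySem.Dict.empty : PySem.Dict Int Int)).contains (x + (n : Int) * w) = false := by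
      intro x hx
      rw [PySem.List.mem_pyRange_one] at hx
      rw [PySem.Dict.contains_eq_decide_mem_keys]
      simp only [decide_eq_false_iff_not]
      intro hmem
      have : (x + (n : Int) * w) ∈ (((PySem.List.pyRange 0 (n : Int) 1).foldl
          (fun d y => (PySem.List.pyRange 0 w 1).foldl (fun d x => d.insert (x + y * w) (f y x)) d)
          (PySem.Dict.empty : PySem.Dict Int Int)).items).map Prod.fst := hmem
      rw [ih] at this
      simp only [List.map_map] at this
      obtain ⟨s, hs, hseq⟩ := List.mem_map.mp this
      rw [PySem.List.mem_pyRange_one] at hs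
      simp only [Function.comp_apply] at hseq
      have : (0:Int) ≤ x := hx.1
      omega
    rw [pvA_row w (n : Int) (f (n : Int)) _ hfresh, ih]
    have hsplit : PySem.List.pyRange 0 (((n : Int) + 1) * w) 1
        = PySem.List.pyRange 0 ((n : Int) * w) 1 ++ PySem.List.pyRange ((n : Int) * w) (((n : Int) + 1) * w) 1 := by
      apply PySem.List.pyRange_one_append
      · positivity
      · nlinarith
    rw [hsplit, List.map_append]
    congr 1
    rw [PySem.List.pyRange_one 0 w, PySem.List.pyRange_one ((n : Int) * w) (((n : Int) + 1) * w)]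
    have hlen : (((n : Int) + 1) * w - (n : Int) * w).toNat = (w - 0).toNat := by
      congr 1; ring
    rw [hlen]
    simp only [List.map_map]
    apply List.map_congr_left
    intro k hk
    have hkw : (k : Int) < w := by
      have := List.mem_range.mp hk
      omega
    have hk0 : (0:Int) ≤ (k : Int) := Int.natCast_nonneg k
    obtain ⟨hq, hr⟩ := pv_decode w (n : Int) (k : Int) hw hk0 hkw
    simp only [Function.comp_apply, zero_add]
    rw [show (n : Int) * w + (k : Int) = (k : Int) + (n : Int) * w by ring, hq, hr]

-- the value B's three passes leave at cell index s
def pvBVal (w s : Int) : Int :=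
  if PySem.Int.mod s w == w - 1 then 1
  else if PySem.Int.mod s w == 0 && decide (w ≤ s) then 0 else 2

-- an override pass over keys already present rewrites the stored values in place
lemma pv_override (k : Int → Int) (v : Int) (ys : List Int) :
    ∀ (l : List Int) (g : Int → Int) (d : PySem.Dict Int Int),
    l.Nodup → (∀ y ∈ ys, k y ∈ l) → d.items = l.map (fun s => (s, g s)) →
    (ys.foldl (fun d y => d.insert (k y) v) d).items
      = l.map (fun s => (s, if s ∈ ys.map k then v else g s)) := by
  induction ys with
  | nil => intro l g d _ _ hd; simpa using hd
  | cons y ys ih =>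
    intro l g d hnd hmem hd
    simp only [List.foldl_cons]
    have hkeys : d.keys = l := by
      simp only [PySem.Dict.keys, hd, List.map_map]
      exact List.map_congr_left (fun s _ => rfl) |>.trans (List.map_id l)
    have hcont : d.contains (k y) = true := by
      rw [PySem.Dict.contains_eq_decide_mem_keys, hkeys]
      simp [hmem y (List.mem_cons_self)]
    have hitems : (d.insert (k y) v).items
        = l.map (fun s => (s, if s = k y then v else g s)) := by
      rw [PySem.Dict.items_insert_of_contains d _ hcont, hd, List.map_map]
      apply List.map_congr_left
      intro s _
      simp only [Function.comp_apply]
      by_cases hs : s = k y <;> simp [hs]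
    rw [ih l _ _ hnd (fun y hy => hmem y (List.mem_cons_of_mem _ hy)) hitems]
    apply List.map_congr_left
    intro s _
    simp only [List.map_cons, List.mem_cons]
    by_cases h1 : s ∈ ys.map k <;> by_cases h2 : s = k y <;> simp [h1, h2]

-- B's three passes produce the row-major list of (s, pvBVal w s)
lemma pvB_items (h w : Int) (hw : 0 < w) :
    (((PySem.List.pyRange 0 h 1).foldl (fun d y => d.insert (y * w + w - 1) 1)
      ((PySem.List.pyRange 1 h 1).foldl (fun d y => d.insert (y * w) 0)
        ((PySem.List.pyRange 0 (h * w) 1).foldl (fun d s => d.insert s 2)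
          (PySem.Dict.empty : PySem.Dict Int Int)))).items)
      = (PySem.List.pyRange 0 (h * w) 1).map (fun s => (s, pvBVal w s)) := by
  have hnd := PySem.List.nodup_pyRange_one 0 (h * w)
  have hd0 : ((PySem.List.pyRange 0 (h * w) 1).foldl (fun d s => d.insert s 2)
      (PySem.Dict.empty : PySem.Dict Int Int)).items
      = (PySem.List.pyRange 0 (h * w) 1).map (fun s => (s, (fun _ => (2:Int)) s)) := by
    have := PySem.Dict.items_foldl_insert_fresh (PySem.List.pyRange 0 (h * w) 1)
      (fun s => s) (fun _ => (2:Int)) (PySem.Dict.empty : PySem.Dict Int Int)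
      (fun a _ => PySem.Dict.contains_empty a) (by simpa using hnd)
    simpa using this
  have hmem1 : ∀ y ∈ PySem.List.pyRange 1 h 1, y * w ∈ PySem.List.pyRange 0 (h * w) 1 := by
    intro y hy
    rw [PySem.List.mem_pyRange_one] at *
    constructor
    · nlinarith [hy.1]
    · nlinarith [hy.2]
  have hd1 := pv_override (fun y => y * w) 0 (PySem.List.pyRange 1 h 1)
    (PySem.List.pyRange 0 (h * w) 1) (fun _ => (2:Int)) _ hnd hmem1 hd0
  have hmem2 : ∀ y ∈ PySem.List.pyRange 0 h 1, y * w + w - 1 ∈ PySem.List.pyRange 0 (h * w) 1 := by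
    intro y hy
    rw [PySem.List.mem_pyRange_one] at *
    constructor
    · nlinarith [hy.1]
    · nlinarith [hy.2]
  have hd2 := pv_override (fun y => y * w + w - 1) 1 (PySem.List.pyRange 0 h 1)
    (PySem.List.pyRange 0 (h * w) 1) _ _ hnd hmem2 hd1
  rw [hd2]
  apply List.map_congr_left
  intro s hs
  rw [PySem.List.mem_pyRange_one] at hs
  obtain ⟨hs0, hsup⟩ := hs
  have hx0 : 0 ≤ PySem.Int.mod s w := PySem.Int.mod_nonneg s hw
  have hxw : PySem.Int.mod s w < w := PySem.Int.mod_lt s hw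
  have hsum : PySem.Int.floordiv s w * w + PySem.Int.mod s w = s := PySem.Int.floordiv_mul_add_mod s w
  have hy0 : 0 ≤ PySem.Int.floordiv s w := by
    rw [PySem.Int.floordiv_eq_ediv_of_pos hw]
    exact Int.ediv_nonneg hs0 hw.le
  have hyh : PySem.Int.floordiv s w < h := by nlinarith
  have hm2 : s ∈ (PySem.List.pyRange 0 h 1).map (fun y => y * w + w - 1)
      ↔ PySem.Int.mod s w = w - 1 := by
    constructor
    · rintro hm
      obtain ⟨y, hy, rfl⟩ := List.mem_map.mp hm
      rw [PySem.List.mem_pyRange_one] at hy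
      have := pv_decode w y (w - 1) hw (by omega) (by omega)
      rw [show y * w + w - 1 = (w - 1) + y * w by ring]
      exact this.2
    · intro hmod
      refine List.mem_map.mpr ⟨PySem.Int.floordiv s w, ?_, by omega⟩
      rw [PySem.List.mem_pyRange_one]; omega
  have hm1 : s ∈ (PySem.List.pyRange 1 h 1).map (fun y => y * w)
      ↔ (PySem.Int.mod s w = 0 ∧ w ≤ s) := by
    constructor
    · rintro hm
      obtain ⟨y, hy, rfl⟩ := List.mem_map.mp hm
      rw [PySem.List.mem_pyRange_one] at hy
      have := pv_decode w y 0 hw le_rfl hw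
      constructor
      · simpa using this.2
      · nlinarith [hy.1]
    · rintro ⟨hmod, hws⟩
      refine List.mem_map.mpr ⟨PySem.Int.floordiv s w, ?_, by omega⟩
      rw [PySem.List.mem_pyRange_one]
      refine ⟨?_, hyh⟩
      nlinarith
  simp only [hm2, hm1]
  simp only [pvBVal, beq_iff_eq, Bool.and_eq_true, decide_eq_true_eq]

-- the two per-cell values agree on every valid cell index
lemma pv_pointwise (h w s : Int) (hw : 0 < w) (hs0 : 0 ≤ s) :
    pvAVal h w (PySem.Int.floordiv s w) (PySem.Int.mod s w) = pvBVal w s := by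
  set y := PySem.Int.floordiv s w with hy
  set x := PySem.Int.mod s w with hx
  have hx0 : 0 ≤ x := PySem.Int.mod_nonneg s hw
  have hxw : x < w := PySem.Int.mod_lt s hw
  have hsum : y * w + x = s := PySem.Int.floordiv_mul_add_mod s w
  have hy0 : 0 ≤ y := by
    rw [hy, PySem.Int.floordiv_eq_ediv_of_pos hw]
    exact Int.ediv_nonneg hs0 hw.le
  have hws : w ≤ s ↔ y ≠ 0 := by
    constructor
    · intro hls hy0'
      rw [hy0'] at hsum; simp at hsum; omega
    · intro hyne
      have h1y : 1 ≤ y := by omega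
      nlinarith
  clear hsum hy hx
  simp only [pvAVal, pvBVal, Bool.and_eq_true, beq_iff_eq, decide_eq_true_eq]
  split_ifs <;> omega

-- ===== VERDICT (by name: the statement is the Claim_ definition above) =====
theorem init_step_safe_policy_spec : Claim_equal_init_step_safe_policy := by
  intro shape _
  obtain ⟨h, w⟩ := shape
  unfold Spec_init_step_safe_policy init_step_safe_policy init_step_safe_policy_alt
  simp only
  by_cases hdeg : h ≤ 0 ∨ w ≤ 0
  · rw [if_pos hdeg]
    rcases hdeg with hh | hw
    · have hhr : PySem.List.pyRange 0 h 1 = [] := by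
        rw [PySem.List.pyRange_one]
        have : (h - 0).toNat = 0 := by omega
        rw [this]; rfl
      rw [hhr]; rfl
    · have hwr : PySem.List.pyRange 0 w 1 = [] := by
        rw [PySem.List.pyRange_one]
        have : (w - 0).toNat = 0 := by omega
        rw [this]; rfl
      rw [hwr]
      simp only [List.foldl_nil]
      rw [List.foldl_fixed]
      rfl
  · rw [not_or] at hdeg; simp only [not_le] at hdeg
    obtain ⟨hh, hw⟩ := hdeg
    rw [if_neg (by omega)]
    have hbody : (fun (d : PySem.Dict Int Int) y =>
        (PySem.List.pyRange 0 w 1).foldl (fun d x =>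
          let s := x + y * w
          if x == w - 1 && y == h - 1 then d.insert s 1
          else if x == w - 1 then d.insert s 1
          else if y == 0 then d.insert s 2
          else if x == 0 then d.insert s 0
          else if y == h - 1 then d.insert s 2
          else d.insert s 2) d)
        = (fun (d : PySem.Dict Int Int) y =>
          (PySem.List.pyRange 0 w 1).foldl (fun d x => d.insert (x + y * w) (pvAVal h w y x)) d) := by
      funext d y
      congr 1
      funext d x
      exact pvA_body h w y x d
    rw [hbody]
    have hcast : ((h.toNat : Nat) : Int) = h := Int.toNat_of_nonneg hh.le
    rw [← hcast, pvA_loop w hw (pvAVal ((h.toNat : Nat) : Int) w) h.toNat,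
      pvB_items ((h.toNat : Nat) : Int) w hw]
    apply List.map_congr_left
    intro s hs
    rw [PySem.List.mem_pyRange_one] at hs
    rw [pv_pointwise ((h.toNat : Nat) : Int) w s hw hs.1]
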